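-- pv_equiv track=rewrite | github.com/ath32/ASCs | 0_Python_scripts/1.2_Filtering_utrs_mollicutes.py | CDS
-- ===== SOURCE A (Python) =====
-- def CDS(sequence, CDS_cleaned, cds_start, cds_stop):
--
--     ''' Obtain coding sequence, given start and stop coordinates '''
--
--     n = str(cds_start)
--     m = str(cds_stop)
--
--     i = sequence.strip().split('(' + n + '..' + m + ')')
--     l = len(i[0])
--
--     for w in i:
--         if w[l-10:l] == 'complement':
--             rc = CDS_cleaned[cds_start-1:cds_stop].replace('a', 'T').replace('t', 'A').replace('c', 'G').replace('g', 'C').lower()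
--             reverse_complement = rc[::-1]
--             return reverse_complement
--         else:
--             cds = CDS_cleaned[cds_start-1:cds_stop]
--             return cds
-- ===== SOURCE B (Python) =====
-- def CDS(sequence, CDS_cleaned, cds_start, cds_stop):
--     ''' Obtain coding sequence, given start and stop coordinates '''
--     marker = '(' + str(cds_start) + '..' + str(cds_stop) + ')'
--     prefix = sequence.strip().split(marker)[0]
--     seg = CDS_cleaned[cds_start-1:cds_stop]
--     if prefix.endswith('complement'):
--         comp = {'a': 't', 't': 'a', 'c': 'g', 'g': 'c'}
--         return ''.join(comp.get(ch, ch.lower()) for ch in reversed(seg))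
--     return seg
-- ===== Notes on version B (the rewrite author's own statement) =====
-- stated objective: idiomatic
-- what changed: The always-returns-on-first-iteration loop over the split pieces is replaced by a direct endswith('complement') test on the piece before the coordinate marker, and the chain of four whole-string .replace passes plus .lower() plus [::-1] is replaced by a single reversed pass with a complement dict (default ch.lower()).
import Mathlib
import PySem

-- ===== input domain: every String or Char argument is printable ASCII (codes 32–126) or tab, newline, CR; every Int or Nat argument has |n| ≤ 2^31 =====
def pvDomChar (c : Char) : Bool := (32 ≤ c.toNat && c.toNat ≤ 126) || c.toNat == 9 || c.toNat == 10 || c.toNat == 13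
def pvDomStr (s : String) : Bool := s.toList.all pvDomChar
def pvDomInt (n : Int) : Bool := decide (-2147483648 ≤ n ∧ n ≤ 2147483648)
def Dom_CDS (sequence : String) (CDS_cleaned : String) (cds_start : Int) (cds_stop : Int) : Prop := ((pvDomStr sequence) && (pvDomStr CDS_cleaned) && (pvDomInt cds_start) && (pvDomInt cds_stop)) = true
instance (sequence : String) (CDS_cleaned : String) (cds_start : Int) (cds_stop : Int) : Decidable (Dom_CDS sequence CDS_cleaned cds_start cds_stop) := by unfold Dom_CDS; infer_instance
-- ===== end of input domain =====

-- B replaces A's always-returns-on-first-piece loop by a direct endswith test and fuses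
-- A's four whole-string replace passes + lower + [::-1] into one reversed pass with a
-- complement dict (objective: more idiomatic; same asymptotic cost).

-- ===== PORT A =====
-- the 'for w in i' loop: each iteration returns, so only the first element is reached;
-- [] → none mirrors Python falling off the loop (unreachable: str.split is never empty).
def CDS_forLoop (CDS_cleaned : String) (cds_start : Int) (cds_stop : Int) (l : Int) : List String → Option String
  | [] => none
  | w :: _ =>
    if PySem.Str.slice w (some (l - 10)) (some l) = "complement" then
      let rc := PySem.Str.lower (PySem.Str.replace (PySem.Str.replace (PySem.Str.replace (PySem.Str.replace (PySem.Str.slice CDS_cleaned (some (cds_start - 1)) (some cds_stop)) "a" "T") "t" "A") "c" "G") "g" "C")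
      let reverse_complement := (PySem.Str.slice? rc none none (-1)).getD ""  -- rc[::-1]; step ≠ 0, never none
      some reverse_complement
    else
      some (PySem.Str.slice CDS_cleaned (some (cds_start - 1)) (some cds_stop))

def CDS (sequence : String) (CDS_cleaned : String) (cds_start : Int) (cds_stop : Int) : String :=
  let n := PySem.Int.toStr cds_start
  let m := PySem.Int.toStr cds_stop
  -- split separator starts with '(' so it is never empty: split? is always some; i[0] always exists
  let i := (PySem.Str.split? (PySem.Str.strip sequence) ("(" ++ n ++ ".." ++ m ++ ")")).getD [""]
  let l := PySem.Str.len ((PySem.List.pyGet? i 0).getD "")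
  (CDS_forLoop CDS_cleaned cds_start cds_stop l i).getD ""

-- ===== PORT B =====
def pyComp : PySem.Dict Char Char := PySem.Dict.ofList [('a', 't'), ('t', 'a'), ('c', 'g'), ('g', 'c')]

def CDS_alt (sequence : String) (CDS_cleaned : String) (cds_start : Int) (cds_stop : Int) : String :=
  let marker := "(" ++ PySem.Int.toStr cds_start ++ ".." ++ PySem.Int.toStr cds_stop ++ ")"
  let pre := (PySem.List.pyGet? ((PySem.Str.split? (PySem.Str.strip sequence) marker).getD [""]) 0).getD ""
  let seg := PySem.Str.slice CDS_cleaned (some (cds_start - 1)) (some cds_stop)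
  if PySem.Str.endswith pre "complement" then
    -- ''.join(comp.get(ch, ch.lower()) for ch in reversed(seg))
    String.ofList (List.map (fun ch => PySem.Dict.getD pyComp ch (PySem.Chars.lowerChar ch)) seg.toList.reverse)
  else
    seg

-- ===== PRECONDITION & SPEC =====
def Spec_CDS (sequence : String) (CDS_cleaned : String) (cds_start : Int) (cds_stop : Int) (out : String) : Prop := out = CDS_alt sequence CDS_cleaned cds_start cds_stop
instance (sequence : String) (CDS_cleaned : String) (cds_start : Int) (cds_stop : Int) (out : String) : Decidable (Spec_CDS sequence CDS_cleaned cds_start cds_stop out) := by unfold Spec_CDS; infer_instance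

-- ===== CLAIM (what is proved, stated in full; the proofs are below) =====
def Claim_equal_CDS : Prop := ∀ (sequence : String) (CDS_cleaned : String) (cds_start : Int) (cds_stop : Int), Dom_CDS sequence CDS_cleaned cds_start cds_stop → Spec_CDS sequence CDS_cleaned cds_start cds_stop (CDS sequence CDS_cleaned cds_start cds_stop)

-- ===== LEMMAS AND PROOFS =====

theorem str_eq_iff_toList (s t : String) : s = t ↔ s.toList = t.toList := by
  constructor
  · intro h; exact congrArg _ h
  · intro h
    have h2 := congrArg String.ofList h
    simpa using h2

theorem splitOn_go_ne_nil (sep : List Char) (fuel : Nat) (l cur : List Char) (acc : List (List Char)) :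
    PySem.Chars.splitOn.go sep fuel l cur acc ≠ [] := by
  induction fuel generalizing l cur acc with
  | zero => simp [PySem.Chars.splitOn.go]
  | succ fuel ih =>
    cases l with
    | nil => simp [PySem.Chars.splitOn.go]
    | cons c rest =>
      rw [PySem.Chars.splitOn.go]
      split
      · exact ih _ _ _
      · exact ih _ _ _

theorem split_getD_ne_nil (s sep : String) (h : sep.toList ≠ []) :
    (PySem.Str.split? s sep).getD [""] ≠ [] := by
  simp only [PySem.Str.split?, PySem.Chars.split?, PySem.Chars.splitOn]
  simp only [List.isEmpty_iff, h, if_false]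
  simp only [Option.map_some, Option.getD_some, ne_eq, List.map_eq_nil_iff]
  exact splitOn_go_ne_nil _ _ _ _ _

-- the slice w[l-10:l] with l = len(w) is exactly the clamped tail of w
theorem slice_last_ten (cs : List Char) :
    PySem.Chars.slice cs (some ((cs.length : Int) - 10)) (some ((cs.length : Int))) =
      cs.drop (PySem.List.clampIdx cs.length ((cs.length : Int) - 10)) := by
  simp only [PySem.Chars.slice_eq_listSlice, PySem.List.slice]
  have hb : PySem.List.clampIdx cs.length ((cs.length : Int)) = cs.length := by
    simp [PySem.List.clampIdx]
  rw [hb]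
  apply List.take_of_length_le
  simp

-- A's last-10-chars comparison is exactly endswith('complement')
theorem cond_iff (w : String) :
    (PySem.Str.slice w (some ((PySem.Str.len w) - 10)) (some (PySem.Str.len w)) = "complement")
      ↔ PySem.Str.endswith w "complement" = true := by
  rw [str_eq_iff_toList]
  have hl : PySem.Str.len w = ((w.toList.length : Int)) := by simp [PySem.Str.len]
  rw [show (PySem.Str.slice w (some ((PySem.Str.len w) - 10)) (some (PySem.Str.len w))).toList
        = PySem.Chars.slice w.toList (some ((w.toList.length : Int) - 10)) (some ((w.toList.length : Int))) by
      rw [hl]; simp [PySem.Str.toList_slice]]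
  rw [slice_last_ten]
  constructor
  · intro h
    have hsuf : (w.toList.drop (PySem.List.clampIdx w.toList.length ((w.toList.length : Int) - 10))) <:+ w.toList :=
      List.drop_suffix _ _
    rw [h] at hsuf
    rw [PySem.Str.endswith_eq]
    exact (PySem.Chars.endswith_iff _ _).mpr hsuf
  · intro h
    have hsuf := (PySem.Chars.endswith_iff _ _).mp (by rw [PySem.Str.endswith_eq] at h; exact h)
    have hlen : ("complement" : String).toList.length ≤ w.toList.length := hsuf.length_le
    have h10 : ("complement" : String).toList.length = 10 := by decide
    have hdrop := List.suffix_iff_eq_drop.mp hsuf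
    have ha : PySem.List.clampIdx w.toList.length ((w.toList.length : Int) - 10) = w.toList.length - 10 := by
      rw [h10] at hlen
      simp only [PySem.List.clampIdx]
      split_ifs <;> omega
    rw [ha]
    rw [hdrop]
    try congr 1
    try omega

-- single-character replace is a map
theorem replace_go_single (a b : Char) (fuel : Nat) (l acc : List Char) (h : l.length ≤ fuel) :
    PySem.Chars.replace.go [a] [b] fuel l acc =
      acc.reverse ++ l.map (fun x => if x = a then b else x) := by
  induction fuel generalizing l acc with
  | zero =>
    have : l = [] := by cases l <;> simp_all
    subst this
    simp [PySem.Chars.replace.go]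
  | succ fuel ih =>
    cases l with
    | nil => simp [PySem.Chars.replace.go]
    | cons c rest =>
      rw [PySem.Chars.replace.go]
      by_cases hac : a = c
      · subst hac
        rw [if_pos (by simp [List.isPrefixOf])]
        rw [ih _ _ (by simpa using Nat.le_of_succ_le_succ h)]
        simp
      · rw [if_neg (by simp [List.isPrefixOf, hac])]
        rw [ih _ _ (by simpa using Nat.le_of_succ_le_succ h)]
        simp [Ne.symm hac]

theorem replace_single (cs : List Char) (a b : Char) :
    PySem.Chars.replace cs [a] [b] = cs.map (fun x => if x = a then b else x) := by
  rw [PySem.Chars.replace]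
  rw [if_neg (by simp)]
  simpa using replace_go_single a b cs.length cs [] (le_refl _)

-- pointwise: A's replace-chain + lower equals B's dict lookup with lower default
theorem comp_pointwise (c : Char) :
    PySem.Chars.lowerChar
        (if (if (if (if c = 'a' then 'T' else c) = 't' then 'A' else (if c = 'a' then 'T' else c)) = 'c' then 'G'
             else (if (if c = 'a' then 'T' else c) = 't' then 'A' else (if c = 'a' then 'T' else c))) = 'g' then 'C'
         else (if (if (if c = 'a' then 'T' else c) = 't' then 'A' else (if c = 'a' then 'T' else c)) = 'c' then 'G'
               else (if (if c = 'a' then 'T' else c) = 't' then 'A' else (if c = 'a' then 'T' else c))))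
      = PySem.Dict.getD pyComp c (PySem.Chars.lowerChar c) := by
  by_cases h1 : c = 'a'
  · subst h1; decide
  by_cases h2 : c = 't'
  · subst h2; decide
  by_cases h3 : c = 'c'
  · subst h3; decide
  by_cases h4 : c = 'g'
  · subst h4; decide
  rw [if_neg h1, if_neg h2, if_neg h3, if_neg h4]
  have hd : PySem.Dict.getD pyComp c (PySem.Chars.lowerChar c) = PySem.Chars.lowerChar c := by
    have hg : pyComp.get? c = none := by
      rw [show pyComp = PySem.Dict.mk [('a', 't'), ('t', 'a'), ('c', 'g'), ('g', 'c')] from rfl]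
      simp [PySem.Dict.get?, Ne.symm h1, Ne.symm h2, Ne.symm h3, Ne.symm h4]
    simp [PySem.Dict.getD, hg]
  rw [hd]

-- A's whole reverse-complement chain equals B's single mapped pass
theorem chain_eq_map (cs : List Char) :
    PySem.Chars.lower (PySem.Chars.replace (PySem.Chars.replace (PySem.Chars.replace (PySem.Chars.replace cs ['a'] ['T']) ['t'] ['A']) ['c'] ['G']) ['g'] ['C'])
      = cs.map (fun ch => PySem.Dict.getD pyComp ch (PySem.Chars.lowerChar ch)) := by
  simp only [replace_single, PySem.Chars.lower, List.map_map]
  apply List.map_congr_left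
  intro c _
  exact comp_pointwise c

theorem forLoop_cons (CDS_cleaned : String) (cds_start cds_stop l : Int) (w : String) (t : List String) :
    CDS_forLoop CDS_cleaned cds_start cds_stop l (w :: t) =
      (if PySem.Str.slice w (some (l - 10)) (some l) = "complement" then
        some ((PySem.Str.slice? (PySem.Str.lower (PySem.Str.replace (PySem.Str.replace (PySem.Str.replace (PySem.Str.replace (PySem.Str.slice CDS_cleaned (some (cds_start - 1)) (some cds_stop)) "a" "T") "t" "A") "c" "G") "g" "C")) none none (-1)).getD "")
      else
        some (PySem.Str.slice CDS_cleaned (some (cds_start - 1)) (some cds_stop))) := rfl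

theorem CDS_eq (sequence : String) (CDS_cleaned : String) (cds_start : Int) (cds_stop : Int) :
    CDS sequence CDS_cleaned cds_start cds_stop = CDS_alt sequence CDS_cleaned cds_start cds_stop := by
  unfold CDS CDS_alt
  dsimp only
  have hsep : ("(" ++ PySem.Int.toStr cds_start ++ ".." ++ PySem.Int.toStr cds_stop ++ ")").toList ≠ [] := by
    intro h
    have hlen := congrArg List.length h
    simp at hlen
  generalize hi : (PySem.Str.split? (PySem.Str.strip sequence) ("(" ++ PySem.Int.toStr cds_start ++ ".." ++ PySem.Int.toStr cds_stop ++ ")")).getD [""] = i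
  have hne : i ≠ [] := hi ▸ split_getD_ne_nil _ _ hsep
  cases i with
  | nil => exact absurd rfl hne
  | cons w t =>
    have hw : PySem.List.pyGet? (w :: t) (0 : Int) = some w := by
      simp [PySem.List.pyGet?, PySem.List.pyIdx?]
    rw [hw, Option.getD_some, forLoop_cons]
    by_cases hc : PySem.Str.slice w (some (PySem.Str.len w - 10)) (some (PySem.Str.len w)) = "complement"
    · rw [if_pos hc, if_pos ((cond_iff w).mp hc)]
      simp only [PySem.Str.slice?_none_none_neg_one, Option.getD_some]
      rw [str_eq_iff_toList]
      simp only [PySem.Str.toList_lower, PySem.Str.toList_replace, PySem.Str.toList_slice]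
      rw [show ("a" : String).toList = ['a'] from rfl, show ("T" : String).toList = ['T'] from rfl,
          show ("t" : String).toList = ['t'] from rfl, show ("A" : String).toList = ['A'] from rfl,
          show ("c" : String).toList = ['c'] from rfl, show ("G" : String).toList = ['G'] from rfl,
          show ("g" : String).toList = ['g'] from rfl, show ("C" : String).toList = ['C'] from rfl]
      rw [chain_eq_map]
      simp [List.map_reverse]
    · rw [if_neg hc, if_neg (by simpa using (fun hh => hc ((cond_iff w).mpr hh)))]
      simp

-- ===== VERDICT (by name: the statement is the Claim_ definition above) =====
theorem CDS_spec : Claim_equal_CDS := by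
  intro sequence CDS_cleaned cds_start cds_stop _
  unfold Spec_CDS
  exact CDS_eq sequence CDS_cleaned cds_start cds_stop
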